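-- pv_equiv track=rewrite | github.com/mikeparcewski/wicked-garden | scripts/engineering/patch/generators/ruby_generator.py | _find_field_insertion_point
-- ===== SOURCE A (Python) =====
-- from typing import Any, Dict, List, Optional, Set
--
-- def _find_field_insertion_point(
--
--     lines: List[str],
--     class_start: int,
--     class_end: int
-- ) -> int:
--     """Find the line after which to insert a new field."""
--     # Insert after last attr_accessor or after class definition
--     last_attr = class_start
--
--     for i in range(class_start + 1, class_end):
--         line = lines[i].strip()
--         if line.startswith("attr_"):
--             last_attr = i
--         elif line.startswith("validates") or line.startswith("belongs_to") or \
--              line.startswith("has_") or line.startswith("def "):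
--             break
--
--     return last_attr
-- ===== SOURCE B (Python) =====
-- def _find_field_insertion_point(lines, class_start, class_end):
--     """Find the line after which to insert a new field."""
--     def _stops(line):
--         s = line.strip()
--         return (s.startswith("validates") or s.startswith("belongs_to")
--                 or s.startswith("has_") or s.startswith("def "))
--     boundary = next((i for i in range(class_start + 1, class_end) if _stops(lines[i])),
--                     class_end)
--     attrs = [i for i in range(class_start + 1, boundary)
--              if lines[i].strip().startswith("attr_")]
--     return attrs[-1] if attrs else class_start
-- ===== Notes on version B (the rewrite author's own statement) =====
-- stated objective: alternative
-- what changed: Replaces A's single accumulating scan with early break by two phases: first find the stop boundary (first validates/belongs_to/has_/'def ' line), then take the last attr_ line before that boundary.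
import Mathlib
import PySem

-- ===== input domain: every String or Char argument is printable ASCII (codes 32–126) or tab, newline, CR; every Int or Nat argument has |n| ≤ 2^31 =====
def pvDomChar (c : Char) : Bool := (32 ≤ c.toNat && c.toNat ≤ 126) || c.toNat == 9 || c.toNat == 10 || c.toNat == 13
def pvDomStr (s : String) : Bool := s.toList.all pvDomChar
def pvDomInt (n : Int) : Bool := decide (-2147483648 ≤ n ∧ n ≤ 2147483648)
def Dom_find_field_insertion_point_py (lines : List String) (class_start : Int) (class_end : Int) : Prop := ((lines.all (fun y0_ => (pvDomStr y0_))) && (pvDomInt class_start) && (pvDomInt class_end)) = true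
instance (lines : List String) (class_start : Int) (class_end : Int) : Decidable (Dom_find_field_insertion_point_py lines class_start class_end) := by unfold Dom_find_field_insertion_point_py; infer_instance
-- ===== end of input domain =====

-- B replaces A's single accumulating loop-with-break by two phases: first find the stop
-- boundary (first 'validates'/'belongs_to'/'has_'/'def ' line), then take the last 'attr_'
-- line before it (objective: alternative decomposition, same cost).

-- `lines[i].strip()` (both sources); the `.getD ""` default is unreachable under Pre_
def pvLineAt (lines : List String) (i : Int) : String :=
  PySem.Str.strip ((PySem.List.pyGet? lines i).getD "")

-- the stop test shared by both sources' `elif` / `_stops`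
def pvIsStop (line : String) : Bool :=
  PySem.Str.startswith line "validates" || PySem.Str.startswith line "belongs_to" ||
  PySem.Str.startswith line "has_" || PySem.Str.startswith line "def "

-- ===== PORT A =====
-- the `for i in range(...)` loop with `break`, as a counter recursion
def pvLoopA (lines : List String) (i ce last_attr : Int) : Int :=
  if _h : i < ce then
    let line := pvLineAt lines i
    if PySem.Str.startswith line "attr_" then pvLoopA lines (i + 1) ce i
    else if pvIsStop line then last_attr
    else pvLoopA lines (i + 1) ce last_attr
  else last_attr
termination_by (ce - i).toNat
decreasing_by all_goals omega

def find_field_insertion_point_py (lines : List String) (class_start : Int) (class_end : Int) : Int :=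
  pvLoopA lines (class_start + 1) class_end class_start

-- ===== PORT B =====
-- `next((i for i in range(s, class_end) if _stops(lines[i])), class_end)`, lazily
def pvFindStop (lines : List String) (i ce : Int) : Int :=
  if _h : i < ce then
    if pvIsStop (pvLineAt lines i) then i else pvFindStop lines (i + 1) ce
  else ce
termination_by (ce - i).toNat
decreasing_by omega

def find_field_insertion_point_py_alt (lines : List String) (class_start : Int) (class_end : Int) : Int :=
  let boundary := pvFindStop lines (class_start + 1) class_end
  let attrs := (PySem.List.pyRange (class_start + 1) boundary 1).filter
      (fun i => PySem.Str.startswith (pvLineAt lines i) "attr_")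
  match attrs.getLast? with
  | some j => j
  | none => class_start

-- ===== PRECONDITION & SPEC =====
-- Exactly the inputs on which Python A returns (no IndexError): the range is empty, or all
-- its indices are in bounds, or a stop line is hit at a valid index before any invalid one.
def Pre_find_field_insertion_point_py (lines : List String) (class_start : Int) (class_end : Int) : Prop :=
  class_end ≤ class_start + 1 ∨
    (-(lines.length : Int) ≤ class_start + 1 ∧
      (class_end ≤ (lines.length : Int) ∨
        ((PySem.List.pyRange (class_start + 1) (lines.length : Int) 1).any
          (fun i => pvIsStop (pvLineAt lines i))) = true))
instance (lines : List String) (class_start : Int) (class_end : Int) : Decidable (Pre_find_field_insertion_point_py lines class_start class_end) := by unfold Pre_find_field_insertion_point_py; infer_instance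

def pvWitness_find_field_insertion_point_py : List String × Int × Int :=
  (["class Foo", "  attr_accessor :name", "  def bar"], 0, 3)

def Spec_find_field_insertion_point_py (lines : List String) (class_start : Int) (class_end : Int) (out : Int) : Prop := out = find_field_insertion_point_py_alt lines class_start class_end
instance (lines : List String) (class_start : Int) (class_end : Int) (out : Int) : Decidable (Spec_find_field_insertion_point_py lines class_start class_end out) := by unfold Spec_find_field_insertion_point_py; infer_instance

-- ===== CLAIM (what is proved, stated in full; the proofs are below) =====
def Claim_equal_find_field_insertion_point_py : Prop := ∀ (lines : List String) (class_start : Int) (class_end : Int), Dom_find_field_insertion_point_py lines class_start class_end → Pre_find_field_insertion_point_py lines class_start class_end → Spec_find_field_insertion_point_py lines class_start class_end (find_field_insertion_point_py lines class_start class_end)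

-- ===== LEMMAS AND PROOFS =====

theorem sw_head (L p : List Char) (h : PySem.Chars.startswith L p = true) :
    ∀ c, p[0]? = some c → L[0]? = some c := by
  rw [PySem.Chars.startswith_iff] at h
  obtain ⟨t, rfl⟩ := h
  intro c hc
  cases p with
  | nil => simp at hc
  | cons a q => simpa using hc

-- a string cannot start with "attr_" and with one of the stop prefixes
theorem attr_not_stop (line : String) (h : PySem.Str.startswith line "attr_" = true) :
    pvIsStop line = false := by
  unfold pvIsStop
  simp only [PySem.Str.startswith_eq] at h ⊢
  have ha := sw_head _ _ h 'a' (by decide)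
  simp only [Bool.or_eq_false_iff]
  refine ⟨⟨⟨?_, ?_⟩, ?_⟩, ?_⟩
  · by_contra hb; simp only [Bool.not_eq_false] at hb
    have := sw_head _ _ hb 'v' (by decide); rw [ha] at this; simp at this
  · by_contra hb; simp only [Bool.not_eq_false] at hb
    have := sw_head _ _ hb 'b' (by decide); rw [ha] at this; simp at this
  · by_contra hb; simp only [Bool.not_eq_false] at hb
    have := sw_head _ _ hb 'h' (by decide); rw [ha] at this; simp at this
  · by_contra hb; simp only [Bool.not_eq_false] at hb
    have := sw_head _ _ hb 'd' (by decide); rw [ha] at this; simp at this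

theorem le_pvFindStop (lines : List String) (i ce : Int) (h : i ≤ ce) :
    i ≤ pvFindStop lines i ce := by
  rw [pvFindStop]
  split
  · split
    · exact le_refl i
    · have := le_pvFindStop lines (i + 1) ce (by omega)
      omega
  · exact h
termination_by (ce - i).toNat
decreasing_by omega

theorem matchLast (a : Int) (l : List Int) (d : Int) :
    (match (a :: l).getLast? with | some j => j | none => d)
      = (match l.getLast? with | some j => j | none => a) := by
  cases l with
  | nil => simp
  | cons b t =>
    rw [List.getLast?_cons_cons]
    cases h : (b :: t).getLast? with
    | none => simp [List.getLast?_eq_none_iff] at h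
    | some j => rfl

theorem pvLoopA_eq (lines : List String) (i ce d : Int) :
    pvLoopA lines i ce d =
      (match ((PySem.List.pyRange i (pvFindStop lines i ce) 1).filter
          (fun j => PySem.Str.startswith (pvLineAt lines j) "attr_")).getLast? with
        | some j => j
        | none => d) := by
  rw [pvLoopA, pvFindStop]
  by_cases hlt : i < ce
  · simp only [dif_pos hlt]
    by_cases ha : PySem.Str.startswith (pvLineAt lines i) "attr_" = true
    · rw [if_pos ha, attr_not_stop _ ha]
      simp only [Bool.false_eq_true, if_false]
      have hb : i + 1 ≤ pvFindStop lines (i + 1) ce := le_pvFindStop lines (i + 1) ce (by omega)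
      rw [PySem.List.pyRange_one_cons (show i < pvFindStop lines (i + 1) ce by omega)]
      have hf : (i :: PySem.List.pyRange (i + 1) (pvFindStop lines (i + 1) ce) 1).filter
            (fun j => PySem.Str.startswith (pvLineAt lines j) "attr_")
          = i :: (PySem.List.pyRange (i + 1) (pvFindStop lines (i + 1) ce) 1).filter
            (fun j => PySem.Str.startswith (pvLineAt lines j) "attr_") := by
        have ha' : PySem.Chars.startswith (pvLineAt lines i).toList ['a','t','t','r','_'] = true := by
          simpa using ha
        simp [ha']
      rw [hf, matchLast]
      exact pvLoopA_eq lines (i + 1) ce i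
    · rw [if_neg ha]
      by_cases hs : pvIsStop (pvLineAt lines i) = true
      · rw [if_pos hs, if_pos hs, PySem.List.pyRange_one_eq_nil (le_refl i)]
        rfl
      · rw [if_neg hs, if_neg hs]
        have hb : i + 1 ≤ pvFindStop lines (i + 1) ce := le_pvFindStop lines (i + 1) ce (by omega)
        rw [PySem.List.pyRange_one_cons (show i < pvFindStop lines (i + 1) ce by omega)]
        have hf : (i :: PySem.List.pyRange (i + 1) (pvFindStop lines (i + 1) ce) 1).filter
              (fun j => PySem.Str.startswith (pvLineAt lines j) "attr_")
            = (PySem.List.pyRange (i + 1) (pvFindStop lines (i + 1) ce) 1).filter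
              (fun j => PySem.Str.startswith (pvLineAt lines j) "attr_") := by
          have ha' : PySem.Chars.startswith (pvLineAt lines i).toList ['a','t','t','r','_'] = false := by
            simpa using ha
          simp [ha']
        rw [hf]
        exact pvLoopA_eq lines (i + 1) ce d
  · simp only [dif_neg hlt]
    rw [PySem.List.pyRange_one_eq_nil (by omega)]
    rfl
termination_by (ce - i).toNat
decreasing_by all_goals omega

-- ===== VERDICT (by name: the statement is the Claim_ definition above) =====
theorem find_field_insertion_point_py_spec : Claim_equal_find_field_insertion_point_py := by
  intro lines cs ce _ _
  unfold Spec_find_field_insertion_point_py find_field_insertion_point_py find_field_insertion_point_py_alt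
  exact pvLoopA_eq lines (cs + 1) ce cs
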